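-- pv_equiv track=rewrite | github.com/miliar/Code_Jam_Webscraper | solutions_python/solutions_year17_round0_nr3/2359.py | answer
-- ===== SOURCE A (Python) =====
-- def answer(sps, k):
--     spas = dict()
--     for s in sorted(sps, reverse=True):
--         k -= sps[s]
--         if k <= 0:
--             return (spaces(s)[0], spaces(s)[1])
--         spas[spaces(s)[0]] = spas.get(spaces(s)[0], 0) + sps[s]
--         spas[spaces(s)[1]] = spas.get(spaces(s)[1], 0) + sps[s]
--     # return (spas, k)
--     return answer(spas, k)
--
-- def spaces(n):
--     if n == 1:
--         return (0, 0)
--     if n == 2: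
--         return (1, 0)
--     if n == 3:
--         return (1, 1)
--     if n % 2 == 0:
--         return (int(n / 2), int(n / 2 - 1))
--     return (int((n - 1) / 2), int((n - 1) / 2))
-- ===== SOURCE B (Python) =====
-- def answer(sps, k):
--     cur = dict(sps)
--     while True:
--         total = sum(cur.values())
--         if k > total:
--             nxt = {}
--             for s, c in cur.items():
--                 nxt[s // 2] = nxt.get(s // 2, 0) + c
--                 nxt[(s - 1) // 2] = nxt.get((s - 1) // 2, 0) + c
--             cur = nxt
--             k -= total
--         else:
--             for s in sorted(cur, reverse=True):
--                 k -= cur[s]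
--                 if k <= 0:
--                     return (s // 2, (s - 1) // 2)
--             # all counts subtracted: k <= 0 now; loop again (only reachable if cur empty)
-- ===== Notes on version B (the rewrite author's own statement) =====
-- stated objective: alternative
-- what changed: A's level-by-level tail recursion (sort every level, subtract inside the sorted scan, rebuild and recurse) becomes an iterative driver that compares k with the level's total count first: non-final levels are rebuilt without sorting and without the early-return scan, only the final level is sorted and scanned; the spaces() helper with its n=1,2,3 special cases collapses to the closed form (s//2, (s-1)//2).
-- outside the precondition, e.g. on answer({5: 3, 3: -2}, 2): A returns (2, 2), B returns (1, 0); on answer({5: -1, 3: 2}, 2): A returns (0, 0), B returns (0, 0)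
import Mathlib
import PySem

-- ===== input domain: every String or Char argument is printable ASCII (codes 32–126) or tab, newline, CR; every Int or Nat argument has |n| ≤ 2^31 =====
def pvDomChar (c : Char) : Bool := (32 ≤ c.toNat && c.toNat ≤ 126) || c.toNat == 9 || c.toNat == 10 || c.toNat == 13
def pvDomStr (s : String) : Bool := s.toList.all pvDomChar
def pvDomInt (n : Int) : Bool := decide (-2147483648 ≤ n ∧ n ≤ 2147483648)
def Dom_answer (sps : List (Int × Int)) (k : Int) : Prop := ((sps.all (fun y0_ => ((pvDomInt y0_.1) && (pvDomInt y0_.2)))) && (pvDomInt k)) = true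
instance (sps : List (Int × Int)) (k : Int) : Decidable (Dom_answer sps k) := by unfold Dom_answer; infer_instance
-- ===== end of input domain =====

-- B replaces A's level-by-level tail recursion (sort every level, early return inside the scan)
-- by an iterative driver that first compares k with the level's total count — sorting only the
-- final level — a different per-level decomposition of the same value; equivalence is about the
-- return value on the stated Pre_ (nonempty dict, positive counts).

-- ===== PORT A =====
-- spaces(n); 'int(n / 2)' / 'int(n / 2 - 1)' / 'int((n - 1) / 2)' are exact here: the float
-- quotient is an integer in every branch taken (even n, resp. odd n), so it equals floor division.
def pySpaces (n : Int) : Int × Int :=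
  if n = 1 then (0, 0)
  else if n = 2 then (1, 0)
  else if n = 3 then (1, 1)
  else if n % 2 = 0 then (PySem.Int.floordiv n 2, PySem.Int.floordiv n 2 - 1)
  else (PySem.Int.floordiv (n - 1) 2, PySem.Int.floordiv (n - 1) 2)

-- the 'for s in sorted(sps, reverse=True)' loop body; 'sps[s]' is getD (s is a key of sps, so no KeyError)
def scanA (d : PySem.Dict Int Int) : List Int → PySem.Dict Int Int → Int → ((Int × Int) ⊕ (PySem.Dict Int Int × Int))
  | [], spas, k => Sum.inr (spas, k)
  | s :: rest, spas, k =>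
    let k' := k - d.getD s 0
    if k' ≤ 0 then Sum.inl ((pySpaces s).1, (pySpaces s).2)
    else
      scanA d rest
        ((spas.modify (pySpaces s).1 0 (· + d.getD s 0)).modify (pySpaces s).2 0 (· + d.getD s 0)) k'

-- the tail recursion 'return answer(spas, k)', driven by fuel: on Dom each level subtracts a
-- doubling positive total from k, so 64 levels are never exhausted on inputs satisfying Pre_.
def goA : Nat → PySem.Dict Int Int → Int → Int × Int
  | 0, _, _ => (0, 0)
  | fuel + 1, d, k =>
    match scanA d (PySem.List.sorted d.keys (fun s => s) true) PySem.Dict.empty k with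
    | Sum.inl r => r
    | Sum.inr (spas, k') => goA fuel spas k'

def answer (sps : List (Int × Int)) (k : Int) : Int × Int :=
  goA 64 (PySem.Dict.ofList sps) k

-- ===== PORT B =====
-- nxt[s // 2] += c ; nxt[(s - 1) // 2] += c
def chStep (d : PySem.Dict Int Int) (p : Int × Int) : PySem.Dict Int Int :=
  (d.modify (PySem.Int.floordiv p.1 2) 0 (· + p.2)).modify (PySem.Int.floordiv (p.1 - 1) 2) 0 (· + p.2)

def buildB (cur : PySem.Dict Int Int) : PySem.Dict Int Int :=
  cur.items.foldl chStep PySem.Dict.empty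

def findB (cur : PySem.Dict Int Int) : List Int → Int → Option (Int × Int)
  | [], _ => none
  | s :: rest, k =>
    let k' := k - cur.getD s 0
    if k' ≤ 0 then some (PySem.Int.floordiv s 2, PySem.Int.floordiv (s - 1) 2)
    else findB cur rest k'

-- the 'while True' loop, driven by the same fuel bound as A's recursion
def goB : Nat → PySem.Dict Int Int → Int → Int × Int
  | 0, _, _ => (0, 0)
  | fuel + 1, cur, k =>
    let total := cur.values.sum
    if total < k then goB fuel (buildB cur) (k - total)
    else
      match findB cur (PySem.List.sorted cur.keys (fun s => s) true) k with
      | some r => r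
      | none => goB fuel cur (k - total)

def answer_alt (sps : List (Int × Int)) (k : Int) : Int × Int :=
  goB 64 (PySem.Dict.ofList sps) k

-- ===== PRECONDITION & SPEC =====
-- Pre_ restricts to the problem's natural domain: a nonempty dict of stall sizes with POSITIVE
-- counts. Outside it A can recurse forever (RecursionError: empty dict, or non-positive counts
-- that keep k from decreasing), and with mixed-sign counts the value A returns depends on which
-- accidental prefix sum first dips below k, a corner no specification fixes and B orders differently.
def Pre_answer (sps : List (Int × Int)) (k : Int) : Prop :=
  sps ≠ [] ∧ ∀ p ∈ sps, 1 ≤ p.2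
instance (sps : List (Int × Int)) (k : Int) : Decidable (Pre_answer sps k) := by
  unfold Pre_answer; infer_instance

def pvWitness_answer : (List (Int × Int)) × Int := ([(4, 1)], 2)

def Spec_answer (sps : List (Int × Int)) (k : Int) (out : Int × Int) : Prop := out = answer_alt sps k
instance (sps : List (Int × Int)) (k : Int) (out : Int × Int) : Decidable (Spec_answer sps k out) := by unfold Spec_answer; infer_instance

-- ===== CLAIM (what is proved, stated in full; the proofs are below) =====
def Claim_equal_answer : Prop := ∀ (sps : List (Int × Int)) (k : Int), Dom_answer sps k → Pre_answer sps k → Spec_answer sps k (answer sps k)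

-- ===== LEMMAS AND PROOFS =====

theorem pySpaces_eq (n : Int) :
    pySpaces n = (PySem.Int.floordiv n 2, PySem.Int.floordiv (n - 1) 2) := by
  unfold pySpaces
  simp only [PySem.Int.floordiv, Int.fdiv_eq_ediv]
  split_ifs with h1 h2 h3 h4 <;> refine Prod.ext ?_ ?_ <;> simp <;> omega

def contrib (p : Int × Int) (t : Int) : Int :=
  (if PySem.Int.floordiv p.1 2 = t then p.2 else 0) +
  (if PySem.Int.floordiv (p.1 - 1) 2 = t then p.2 else 0)

theorem getD_chStep (d : PySem.Dict Int Int) (p : Int × Int) (t : Int) :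
    (chStep d p).getD t 0 = d.getD t 0 + contrib p t := by
  unfold chStep contrib
  simp only [PySem.Dict.getD_modify]
  split_ifs <;> simp_all <;> omega

theorem getD_foldl_chStep (P : List (Int × Int)) :
    ∀ (d : PySem.Dict Int Int) (t : Int),
      (P.foldl chStep d).getD t 0 = d.getD t 0 + (P.map (contrib · t)).sum := by
  induction P with
  | nil => intro d t; simp
  | cons p P ih =>
    intro d t
    simp only [List.foldl_cons, List.map_cons, List.sum_cons, ih, getD_chStep]
    omega

theorem mem_keys_chStep (d : PySem.Dict Int Int) (p : Int × Int) (t : Int) :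
    t ∈ (chStep d p).keys ↔
      t ∈ d.keys ∨ t = PySem.Int.floordiv p.1 2 ∨ t = PySem.Int.floordiv (p.1 - 1) 2 := by
  unfold chStep
  rw [PySem.Dict.keys_modify, PySem.Dict.mem_keys_insert, PySem.Dict.keys_modify,
    PySem.Dict.mem_keys_insert]
  tauto

theorem mem_keys_foldl_chStep (P : List (Int × Int)) :
    ∀ (d : PySem.Dict Int Int) (t : Int),
      t ∈ (P.foldl chStep d).keys ↔
        t ∈ d.keys ∨ ∃ p ∈ P, t = PySem.Int.floordiv p.1 2 ∨ t = PySem.Int.floordiv (p.1 - 1) 2 := by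
  induction P with
  | nil => intro d t; simp
  | cons p P ih =>
    intro d t
    simp only [List.foldl_cons, ih, mem_keys_chStep, List.mem_cons]
    constructor
    · rintro ((h | h | h) | ⟨q, hq, h⟩)
      · exact Or.inl h
      · exact Or.inr ⟨p, Or.inl rfl, Or.inl h⟩
      · exact Or.inr ⟨p, Or.inl rfl, Or.inr h⟩
      · exact Or.inr ⟨q, Or.inr hq, h⟩
    · rintro (h | ⟨q, (rfl | hq), h⟩)
      · exact Or.inl (Or.inl h)
      · exact Or.inl (Or.inr h)
      · exact Or.inr ⟨q, hq, h⟩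

theorem nodup_keys_chStep (d : PySem.Dict Int Int) (p : Int × Int)
    (h : d.keys.Nodup) : (chStep d p).keys.Nodup := by
  unfold chStep
  rw [PySem.Dict.keys_modify]
  refine PySem.Dict.nodup_keys_insert _ _ _ ?_
  rw [PySem.Dict.keys_modify]
  exact PySem.Dict.nodup_keys_insert _ _ _ h

theorem nodup_keys_foldl_chStep (P : List (Int × Int)) :
    ∀ (d : PySem.Dict Int Int), d.keys.Nodup → (P.foldl chStep d).keys.Nodup := by
  induction P with
  | nil => intro d h; simpa using h
  | cons p P ih =>
    intro d h
    simpa using ih _ (nodup_keys_chStep d p h)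

-- A's per-level scan, expressed through B's findB and the child fold
theorem scan_find (d1 d2 : PySem.Dict Int Int)
    (hv : ∀ t, d1.getD t 0 = d2.getD t 0) :
    ∀ (L : List Int) (spas : PySem.Dict Int Int) (k : Int),
      scanA d1 L spas k =
        match findB d2 L k with
        | some r => Sum.inl r
        | none =>
          Sum.inr ((L.map (fun s => (s, d1.getD s 0))).foldl chStep spas,
            k - (L.map (fun s => d1.getD s 0)).sum) := by
  intro L
  induction L with
  | nil => intro spas k; simp [scanA, findB]
  | cons s rest ih =>
    intro spas k
    simp only [scanA, findB, ← hv s, pySpaces_eq]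
    by_cases h : k - d1.getD s 0 ≤ 0
    · simp [h]
    · simp only [h, if_false, ih, List.map_cons, List.foldl_cons, List.sum_cons]
      have harith : k - d1.getD s 0 - (rest.map (fun s => d1.getD s 0)).sum =
          k - (d1.getD s 0 + (rest.map (fun s => d1.getD s 0)).sum) := by omega
      rw [harith]
      have hch : chStep spas (s, d1.getD s 0) =
          (spas.modify (PySem.Int.floordiv s 2) 0 (· + d1.getD s 0)).modify
            (PySem.Int.floordiv (s - 1) 2) 0 (· + d1.getD s 0) := rfl
      rw [hch]

theorem findB_none (d2 : PySem.Dict Int Int) :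
    ∀ (L : List Int) (k : Int), (∀ s ∈ L, 1 ≤ d2.getD s 0) →
      (L.map (fun s => d2.getD s 0)).sum < k → findB d2 L k = none := by
  intro L
  induction L with
  | nil => intro k _ _; rfl
  | cons s rest ih =>
    intro k hpos hsum
    simp only [List.map_cons, List.sum_cons] at hsum
    have h1 : 1 ≤ d2.getD s 0 := hpos s (by simp)
    have hrest : ∀ t ∈ rest, 1 ≤ d2.getD t 0 := fun t ht => hpos t (by simp [ht])
    have hp : ∀ x ∈ rest.map (fun s => d2.getD s 0), 0 ≤ x := by
      intro x hx
      rcases List.mem_map.mp hx with ⟨t, ht, rfl⟩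
      have := hrest t ht; omega
    have hnn : 0 ≤ (rest.map (fun s => d2.getD s 0)).sum := List.sum_nonneg hp
    simp only [findB]
    have hk : ¬ (k - d2.getD s 0 ≤ 0) := by omega
    simp only [hk, if_false]
    exact ih _ hrest (by omega)

theorem findB_none_nil (d2 : PySem.Dict Int Int) :
    ∀ (L : List Int) (k : Int), (∀ s ∈ L, 1 ≤ d2.getD s 0) →
      k ≤ (L.map (fun s => d2.getD s 0)).sum → findB d2 L k = none → L = [] := by
  intro L
  induction L with
  | nil => intro _ _ _ _; rfl
  | cons s rest ih =>
    intro k hpos hsum hnone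
    exfalso
    simp only [findB] at hnone
    by_cases h : k - d2.getD s 0 ≤ 0
    · simp [h] at hnone
    · simp only [h, if_false] at hnone
      simp only [List.map_cons, List.sum_cons] at hsum
      have := ih (k - d2.getD s 0) (fun t ht => hpos t (by simp [ht])) (by omega) hnone
      subst this
      simp at h hsum
      omega

-- values of ofList come from the input pairs
theorem mem_values_foldl_insert (ps : List (Int × Int)) :
    ∀ (d : PySem.Dict Int Int) (w : Int),
      w ∈ (ps.foldl (fun acc p => acc.insert p.1 p.2) d).values →
        w ∈ d.values ∨ w ∈ ps.map (·.2) := by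
  induction ps with
  | nil => intro d w h; exact Or.inl h
  | cons p ps ih =>
    intro d w h
    simp only [List.foldl_cons] at h
    rcases ih _ _ h with h' | h'
    · rcases PySem.Dict.mem_values_insert _ _ _ _ h' with rfl | h''
      · exact Or.inr (by simp)
      · exact Or.inl h''
    · exact Or.inr (by simp [h'])

theorem pos_ofList (sps : List (Int × Int)) (hpos : ∀ p ∈ sps, 1 ≤ p.2) :
    ∀ t ∈ (PySem.Dict.ofList sps).keys, 1 ≤ (PySem.Dict.ofList sps).getD t 0 := by
  intro t ht
  have hnd := PySem.Dict.nodup_keys_ofList (κ := Int) (ν := Int) sps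
  have hmem : (PySem.Dict.ofList sps).getD t 0 ∈ (PySem.Dict.ofList sps).values := by
    rw [PySem.Dict.values_eq_map_keys _ hnd 0]
    exact List.mem_map.mpr ⟨t, ht, rfl⟩
  have : (PySem.Dict.ofList sps).getD t 0 ∈ PySem.Dict.empty.values ∨
      (PySem.Dict.ofList sps).getD t 0 ∈ sps.map (·.2) :=
    mem_values_foldl_insert sps _ _ hmem
  rcases this with h | h
  · simp [PySem.Dict.values, PySem.Dict.empty] at h
  · rcases List.mem_map.mp h with ⟨p, hp, he⟩
    rw [← he]; exact hpos p hp

-- the main driver induction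
theorem go_eq : ∀ (fuel : Nat) (d1 d2 : PySem.Dict Int Int) (k : Int),
    d1.keys.Perm d2.keys → (∀ t, d1.getD t 0 = d2.getD t 0) →
    (∀ t ∈ d1.keys, 1 ≤ d1.getD t 0) → d1.keys.Nodup → d2.keys.Nodup →
    goA fuel d1 k = goB fuel d2 k := by
  intro fuel
  induction fuel with
  | zero => intro d1 d2 k _ _ _ _ _; rfl
  | succ fuel ih =>
    intro d1 d2 k hk hv hpos hn1 hn2
    set S := PySem.List.sorted d1.keys (fun s => s) true with hSdef
    have hSperm : S.Perm d1.keys := PySem.List.sorted_perm _ _ _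
    have hSnd : S.Nodup := (hSperm.nodup_iff).mpr hn1
    have hSgt : List.Pairwise (fun a b : Int => b < a) S := by
      have h1 := PySem.List.sorted_pairwise_rev d1.keys (fun s : Int => s)
      rw [← hSdef] at h1
      exact (h1.and hSnd).imp (fun hab => lt_of_le_of_ne hab.1 (fun e => hab.2 e.symm))
    have hS2 : PySem.List.sorted d2.keys (fun s : Int => s) true = S :=
      PySem.List.sorted_rev_eq_of_perm_of_pairwise_gt _ _ _ (hSperm.trans hk) hSgt
    have hposS : ∀ s ∈ S, 1 ≤ d1.getD s 0 := fun s hs => hpos s (hSperm.mem_iff.mp hs)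
    have hposS2 : ∀ s ∈ S, 1 ≤ d2.getD s 0 := fun s hs => (hv s) ▸ hposS s hs
    have hmapSv : S.map (fun s => d2.getD s 0) = S.map (fun s => d1.getD s 0) :=
      List.map_congr_left (fun t _ => (hv t).symm)
    have htot : d2.values.sum = (S.map (fun s => d1.getD s 0)).sum := by
      have h2 : d2.values = d2.keys.map (fun t => d2.getD t 0) :=
        PySem.Dict.values_eq_map_keys d2 hn2 0
      have hmapeq : d2.keys.map (fun t => d2.getD t 0) = d2.keys.map (fun t => d1.getD t 0) :=
        List.map_congr_left (fun t _ => (hv t).symm)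
      have hp : (S.map (fun s => d1.getD s 0)).Perm (d2.keys.map (fun t => d1.getD t 0)) :=
        (hSperm.trans hk).map _
      rw [h2, hmapeq, ← hp.sum_eq]
    simp only [goA, goB, hS2, ← hSdef]
    rw [scan_find d1 d2 hv S PySem.Dict.empty k]
    by_cases hcase : d2.values.sum < k
    · have hfnone : findB d2 S k = none := by
        apply findB_none d2 S k hposS2
        rw [hmapSv, ← htot]
        exact hcase
      simp only [hfnone, if_pos hcase]
      rw [← htot]
      -- the two next-level dicts
      have hitems : d2.items = d2.keys.map (fun t => (t, d1.getD t 0)) := by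
        rw [PySem.Dict.items_eq_map_keys d2 hn2 0]
        exact List.map_congr_left (fun t _ => by rw [hv t])
      have hPP : (S.map (fun s => (s, d1.getD s 0))).Perm d2.items := by
        rw [hitems]
        exact (hSperm.trans hk).map _
      have hnA : ((S.map (fun s => (s, d1.getD s 0))).foldl chStep PySem.Dict.empty).keys.Nodup :=
        nodup_keys_foldl_chStep _ _ (by rw [PySem.Dict.keys_empty]; exact List.nodup_nil)
      have hnB : (buildB d2).keys.Nodup :=
        nodup_keys_foldl_chStep _ _ (by rw [PySem.Dict.keys_empty]; exact List.nodup_nil)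
      apply ih
      · rw [List.perm_ext_iff_of_nodup hnA hnB]
        intro t
        unfold buildB
        rw [mem_keys_foldl_chStep, mem_keys_foldl_chStep, PySem.Dict.keys_empty]
        constructor
        · rintro (h | ⟨p, hp, h⟩)
          · simp at h
          · exact Or.inr ⟨p, hPP.mem_iff.mp hp, h⟩
        · rintro (h | ⟨p, hp, h⟩)
          · simp at h
          · exact Or.inr ⟨p, hPP.mem_iff.mpr hp, h⟩
      · intro t
        unfold buildB
        rw [getD_foldl_chStep, getD_foldl_chStep]
        rw [(hPP.map (contrib · t)).sum_eq]
      · intro t ht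
        rw [mem_keys_foldl_chStep, PySem.Dict.keys_empty] at ht
        rcases ht with h | ⟨p, hp, hchild⟩
        · simp at h
        · rw [getD_foldl_chStep, PySem.Dict.getD_empty]
          have hcontribs_nonneg : ∀ x ∈ (S.map (fun s => (s, d1.getD s 0))).map (contrib · t), 0 ≤ x := by
            intro x hx
            rcases List.mem_map.mp hx with ⟨q, hq, rfl⟩
            rcases List.mem_map.mp hq with ⟨u, hu, rfl⟩
            have := hposS u hu
            unfold contrib
            split_ifs <;> omega
          have hmem : contrib p t ∈ (S.map (fun s => (s, d1.getD s 0))).map (contrib · t) :=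
            List.mem_map.mpr ⟨p, hp, rfl⟩
          have hle := List.single_le_sum hcontribs_nonneg _ hmem
          rcases List.mem_map.mp hp with ⟨u, hu, rfl⟩
          have hu1 := hposS u hu
          have : 1 ≤ contrib (u, d1.getD u 0) t := by
            unfold contrib
            simp only at hchild ⊢
            rcases hchild with h1 | h1 <;> rw [h1] <;> split_ifs <;> omega
          omega
      · exact hnA
      · exact hnB
    · simp only [if_neg hcase]
      cases hfb : findB d2 S k with
      | some r => rfl
      | none =>
        have hSnil : S = [] := by
          apply findB_none_nil d2 S k hposS2 _ hfb
          rw [hmapSv, ← htot]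
          omega
        have hd1nil : d1.keys = [] := by
          rw [hSdef] at hSnil
          exact (PySem.List.sorted_eq_nil_iff _ _ _).mp hSnil
        have hd2nil : d2.keys = [] := by
          rw [hd1nil] at hk
          exact (hk.symm).eq_nil
        have htot0 : d2.values.sum = 0 := by
          rw [htot, hSnil]
          rfl
        rw [hSnil, htot0]
        simp only [List.map_nil, List.foldl_nil, List.sum_nil]
        apply ih
        · rw [PySem.Dict.keys_empty, hd2nil]
        · intro t
          rw [PySem.Dict.getD_empty]
          refine (PySem.Dict.getD_of_not_contains d2 0 ?_).symm
          rcases hc : d2.contains t with _ | _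
          · rfl
          · exfalso
            have := (PySem.Dict.contains_iff_mem_keys d2 t).mp hc
            rw [hd2nil] at this
            simp at this
        · intro t ht
          rw [PySem.Dict.keys_empty] at ht
          simp at ht
        · rw [PySem.Dict.keys_empty]; exact List.nodup_nil
        · exact hn2

-- ===== VERDICT (by name: the statement is the Claim_ definition above) =====
theorem answer_spec : Claim_equal_answer := by
  intro sps k _ hpre
  unfold Spec_answer answer answer_alt
  exact go_eq 64 _ _ k (List.Perm.refl _) (fun _ => rfl)
    (pos_ofList sps hpre.2) (PySem.Dict.nodup_keys_ofList sps) (PySem.Dict.nodup_keys_ofList sps)
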